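-- pv_equiv track=rewrite | github.com/nunonas/pycsv | trabalho4_43558.py | convert_upper
-- ===== SOURCE A (Python) =====
-- from copy import deepcopy
--
-- def convert_upper(dicionario):
--     """
--     Funcao que recebe um dicionario e transforma os carateres das keys em letras maiusculas.
--     Require: dicionario e um dicionario.
--     Ensures: Devolve um dicionario.
--     """
--     dic = deepcopy(dicionario)
--     dic_keys = dic.keys()
--     novo_dic = {}
--     for i in dic_keys:
--         new_key = i.upper()
--         if new_key in novo_dic:
--             novo_dic[new_key] = novo_dic[new_key] + dic[i]
--         else:
--             novo_dic[new_key] = dic[i]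
--
--     return novo_dic
-- ===== SOURCE B (Python) =====
-- def convert_upper(dicionario):
--     # Nested-scan alternative: first list the distinct uppercased keys in
--     # first-seen order, then for each such key rescan the whole input and
--     # concatenate every matching value list.  No dict accumulator, no deepcopy.
--     ordem = []
--     for k in dicionario:
--         u = k.upper()
--         if u not in ordem:
--             ordem.append(u)
--     return {u: [x for k, v in dicionario.items() if k.upper() == u for x in v]
--             for u in ordem}
-- ===== Notes on version B (the rewrite author's own statement) =====
-- stated objective: alternative
-- what changed: B replaces A's single-pass dict accumulator (membership test + in-place concatenation) by a dict-free nested scan: one pass collects the distinct uppercased keys in first-seen order, then for each such key a comprehension rescans the whole input and concatenates the matching value lists; the deepcopy is dropped.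
import Mathlib
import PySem

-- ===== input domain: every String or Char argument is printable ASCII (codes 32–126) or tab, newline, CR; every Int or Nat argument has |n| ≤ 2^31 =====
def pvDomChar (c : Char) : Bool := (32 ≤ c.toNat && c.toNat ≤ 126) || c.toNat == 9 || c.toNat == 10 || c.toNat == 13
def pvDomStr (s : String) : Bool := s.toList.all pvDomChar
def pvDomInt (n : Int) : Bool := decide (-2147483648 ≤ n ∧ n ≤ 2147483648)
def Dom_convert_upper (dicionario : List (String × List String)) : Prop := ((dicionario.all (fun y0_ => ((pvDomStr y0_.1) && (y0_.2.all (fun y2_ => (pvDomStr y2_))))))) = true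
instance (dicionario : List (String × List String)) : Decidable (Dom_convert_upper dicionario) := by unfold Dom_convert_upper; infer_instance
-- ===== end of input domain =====

-- B replaces A's dict-accumulator pass by a dict-free nested scan (distinct uppercased keys in first-seen order, then one rescan per key concatenating matches); same return value, a genuinely different traversal.


-- ===== PORT A =====
def convert_upper (dicionario : List (String × List String)) : List (String × List String) :=
  -- dic = deepcopy(dicionario): a value copy; iterating dict keys gives i, dic[i] is i.2
  (dicionario.foldl
    (fun (novo_dic : PySem.Dict String (List String)) i =>
      let new_key := PySem.Str.upper i.1
      if novo_dic.contains new_key then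
        novo_dic.insert new_key (novo_dic.getD new_key [] ++ i.2)
      else
        novo_dic.insert new_key i.2)
    PySem.Dict.empty).items

-- ===== PORT B =====
def convert_upper_alt (dicionario : List (String × List String)) : List (String × List String) :=
  let ordem := dicionario.foldl
    (fun (ks : List String) k =>
      let u := PySem.Str.upper k.1
      if u ∈ ks then ks else ks ++ [u]) []
  ordem.map (fun u =>
    (u, dicionario.flatMap (fun p => if PySem.Str.upper p.1 == u then p.2 else [])))

-- ===== PRECONDITION & SPEC =====
def Spec_convert_upper (dicionario : List (String × List String)) (out : List (String × List String)) : Prop := out = convert_upper_alt dicionario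
instance (dicionario : List (String × List String)) (out : List (String × List String)) : Decidable (Spec_convert_upper dicionario out) := by unfold Spec_convert_upper; infer_instance

-- ===== CLAIM =====
def Claim_equal_convert_upper : Prop := ∀ (dicionario : List (String × List String)), Dom_convert_upper dicionario → Spec_convert_upper dicionario (convert_upper dicionario)

-- ===== LEMMAS AND PROOFS =====

-- A's loop body, named for the proofs (definitionally the lambda in the port)
def pvStepA (novo_dic : PySem.Dict String (List String)) (i : String × List String) :
    PySem.Dict String (List String) :=
  let new_key := PySem.Str.upper i.1
  if novo_dic.contains new_key then
    novo_dic.insert new_key (novo_dic.getD new_key [] ++ i.2)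
  else
    novo_dic.insert new_key i.2

-- concatenation of the value lists of l whose uppercased key is u (B's inner rescan)
def pvMatch (l : List (String × List String)) (u : String) : List String :=
  l.flatMap (fun p => if PySem.Str.upper p.1 == u then p.2 else [])

-- B's first pass: distinct uppercased keys in first-seen order, starting from ks
def pvKeys (l : List (String × List String)) (ks : List String) : List String :=
  l.foldl (fun ks k =>
    let u := PySem.Str.upper k.1
    if u ∈ ks then ks else ks ++ [u]) ks

-- invariant linking A's dict fold to B's two passes
theorem pv_inv (l : List (String × List String))
    (d : PySem.Dict String (List String)) (ks : List String) (f : String → List String)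
    (hnd : ks.Nodup) (h : d.items = ks.map (fun u => (u, f u))) :
    (l.foldl pvStepA d).items =
    (pvKeys l ks).map (fun u => (u, (if u ∈ ks then f u else []) ++ pvMatch l u)) := by
  induction l generalizing d ks f with
  | nil =>
    simp only [List.foldl_nil, pvKeys, pvMatch, List.flatMap_nil, List.append_nil, h]
    exact (List.map_congr_left fun u hu => by simp [hu]).symm
  | cons p t ih =>
    have hkeys : d.keys = ks := by
      simp only [PySem.Dict.keys, h, List.map_map]
      rw [show ((fun x : String × List String => x.1) ∘ fun u : String => (u, f u)) = id from rfl,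
        List.map_id]
    have hcont : d.contains (PySem.Str.upper p.1) = decide (PySem.Str.upper p.1 ∈ ks) := by
      rw [PySem.Dict.contains_eq_decide_mem_keys, hkeys]
    rw [List.foldl_cons]
    by_cases hc : PySem.Str.upper p.1 ∈ ks
    · -- collision key: A overwrites in place; B's key list is unchanged
      have hget : d.getD (PySem.Str.upper p.1) [] = f (PySem.Str.upper p.1) :=
        PySem.Dict.getD_of_mem_items d
          (by rw [h]; exact List.mem_map.mpr ⟨_, hc, rfl⟩) (hkeys ▸ hnd) []
      have hF : pvStepA d p =
          d.insert (PySem.Str.upper p.1) (f (PySem.Str.upper p.1) ++ p.2) := by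
        simp [pvStepA, hcont, hc, hget]
      have hstep : (d.insert (PySem.Str.upper p.1) (f (PySem.Str.upper p.1) ++ p.2)).items
          = ks.map (fun u =>
              (u, if u = PySem.Str.upper p.1 then f (PySem.Str.upper p.1) ++ p.2 else f u)) := by
        rw [PySem.Dict.items_insert_of_contains d _ (by rw [hcont]; simpa using hc),
          h, List.map_map]
        apply List.map_congr_left
        intro u hu
        by_cases he : u = PySem.Str.upper p.1 <;> simp [Function.comp, he]
      rw [hF, ih _ ks _ hnd hstep]
      have hK : pvKeys (p :: t) ks = pvKeys t ks := by
        show pvKeys t (if PySem.Str.upper p.1 ∈ ks then ks else ks ++ [PySem.Str.upper p.1]) = _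
        rw [if_pos hc]
      rw [hK]
      apply List.map_congr_left
      intro u hu
      by_cases he : u = PySem.Str.upper p.1
      · subst he
        simp [pvMatch, hc, List.append_assoc]
      · by_cases hks : u ∈ ks <;>
          · simp [pvMatch, hks, he]
            exact fun hh => absurd hh.symm he
    · -- fresh key: A appends; B's key list grows by the new key
      have hc' : d.contains (PySem.Str.upper p.1) = false := by
        rw [hcont]; simpa using hc
      have hF : pvStepA d p = d.insert (PySem.Str.upper p.1) p.2 := by
        show (if d.contains (PySem.Str.upper p.1) = true then
            d.insert (PySem.Str.upper p.1) (d.getD (PySem.Str.upper p.1) [] ++ p.2)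
          else d.insert (PySem.Str.upper p.1) p.2) = _
        rw [hc']
        rfl
      have hnd2 : (ks ++ [PySem.Str.upper p.1]).Nodup := by
        rw [List.nodup_append]
        exact ⟨hnd, List.nodup_singleton _, by
          intro a ha b hb
          simp only [List.mem_singleton] at hb
          subst hb
          exact fun he => hc (he ▸ ha)⟩
      have hstep : (d.insert (PySem.Str.upper p.1) p.2).items
          = (ks ++ [PySem.Str.upper p.1]).map (fun u =>
              (u, if u = PySem.Str.upper p.1 then p.2 else f u)) := by
        rw [PySem.Dict.items_insert_of_not_contains d _ hc', h, List.map_append]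
        congr 1
        · apply List.map_congr_left
          intro u hu
          have : u ≠ PySem.Str.upper p.1 := fun he => hc (he ▸ hu)
          simp [this]
        · simp
      rw [hF, ih _ _ _ hnd2 hstep]
      have hK : pvKeys (p :: t) ks = pvKeys t (ks ++ [PySem.Str.upper p.1]) := by
        show pvKeys t (if PySem.Str.upper p.1 ∈ ks then ks else ks ++ [PySem.Str.upper p.1]) = _
        rw [if_neg hc]
      rw [hK]
      apply List.map_congr_left
      intro u hu
      by_cases he : u = PySem.Str.upper p.1
      · subst he
        simp [pvMatch, hc]
      · by_cases hks : u ∈ ks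
        · simp [pvMatch, hks, he]
          exact fun hh => absurd hh.symm he
        · have hks2 : u ∉ ks ++ [PySem.Str.upper p.1] := by simp [hks, he]
          simp [pvMatch, hks, hks2]
          exact fun hh => absurd hh.symm he

-- ===== VERDICT =====
theorem convert_upper_spec : Claim_equal_convert_upper := by
  intro l _
  unfold Spec_convert_upper convert_upper convert_upper_alt
  rw [show (l.foldl
      (fun (novo_dic : PySem.Dict String (List String)) i =>
        let new_key := PySem.Str.upper i.1
        if novo_dic.contains new_key then
          novo_dic.insert new_key (novo_dic.getD new_key [] ++ i.2)
        else
          novo_dic.insert new_key i.2) PySem.Dict.empty) = l.foldl pvStepA PySem.Dict.empty from rfl,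
    pv_inv l PySem.Dict.empty [] (fun _ => []) List.nodup_nil rfl]
  simp [pvKeys, pvMatch]
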